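-- pv_equiv track=rewrite | github.com/jayr-o1/resume-certification-parser | extract_and_process.py | _deduplicate_skills
-- ===== SOURCE A (Python) =====
-- from collections import defaultdict
--
-- def _deduplicate_skills(skills):
--     """
--     Deduplicate skills by name and retain the best context
--
--     Args:
--         skills (list): List of skill dictionaries
--
--     Returns:
--         list: Deduplicated list of skill dictionaries
--     """
--     # Group skills by name
--     skill_groups = defaultdict(list)
--     for skill in skills:
--         skill_groups[skill["name"]].append(skill)
--
--     # For each skill name, select the skill with the richest context
--     deduplicated_skills = []
--     for skill_name, skill_instances in skill_groups.items():
--         # Sort by context length (richest context)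
--         sorted_instances = sorted(skill_instances, key=lambda x: len(x["context"]), reverse=True)
--         deduplicated_skills.append(sorted_instances[0])
--
--     return deduplicated_skills
-- ===== SOURCE B (Python) =====
-- def _deduplicate_skills(skills):
--     """Deduplicate skills by name, keeping the instance with the longest
--     context; single pass, no grouping, no sorting."""
--     best = {}
--     for skill in skills:
--         name = skill["name"]
--         cur = best.get(name)
--         if cur is None or len(skill["context"]) > len(cur["context"]):
--             best[name] = skill
--     return list(best.values())
-- ===== Notes on version B (the rewrite author's own statement) =====
-- stated objective: faster
-- what changed: Replaced group-by-name plus per-group descending stable sort with a single pass keeping, per name, the first skill whose context is strictly longest in a dict; dict insertion order reproduces A's group order and strict '>' reproduces the stable-sort tie-break.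
import Mathlib
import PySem

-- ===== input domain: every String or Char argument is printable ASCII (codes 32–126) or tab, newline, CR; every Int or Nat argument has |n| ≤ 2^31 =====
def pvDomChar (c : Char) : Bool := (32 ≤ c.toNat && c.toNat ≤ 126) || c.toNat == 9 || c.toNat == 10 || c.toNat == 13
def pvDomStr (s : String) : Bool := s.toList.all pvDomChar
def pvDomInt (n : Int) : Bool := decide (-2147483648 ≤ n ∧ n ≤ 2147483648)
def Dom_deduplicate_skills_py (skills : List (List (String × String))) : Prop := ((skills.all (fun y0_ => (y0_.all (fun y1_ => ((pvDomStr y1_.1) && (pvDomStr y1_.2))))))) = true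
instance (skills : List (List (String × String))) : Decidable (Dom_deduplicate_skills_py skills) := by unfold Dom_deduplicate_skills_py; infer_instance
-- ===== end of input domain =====

-- B replaces A's group-by-name + per-group descending stable sort by one pass keeping,
-- per name, the first skill with strictly longest context (dict insertion order).

-- ===== PORT A =====
-- len(x["context"]) as both Pythons compute it (the .getD "" default only fires outside Pre_,
-- where Python raises KeyError and nothing is claimed)
def pvCtxLen (x : List (String × String)) : Int :=
  PySem.Str.len (((PySem.Dict.mk x).get? "context").getD "")

-- skill["name"] (none = KeyError, excluded by Pre_)
def pvNameOf (x : List (String × String)) : Option String :=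
  (PySem.Dict.mk x).get? "name"

def pvStepA (d : PySem.Dict String (List (List (String × String)))) (skill : List (String × String)) :
    PySem.Dict String (List (List (String × String))) :=
  match pvNameOf skill with
  | some n => d.modify n [] (fun g => g ++ [skill])
  | none => d

def deduplicate_skills_py (skills : List (List (String × String))) : List (List (String × String)) :=
  -- skill_groups = defaultdict(list); for skill in skills: skill_groups[skill["name"]].append(skill)
  let skill_groups : PySem.Dict String (List (List (String × String))) :=
    skills.foldl pvStepA (PySem.Dict.mk [])
  -- for name, insts in skill_groups.items(): deduplicated.append(sorted(insts, key=len(ctx), reverse=True)[0])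
  skill_groups.items.foldl (fun out p =>
    match PySem.List.sorted p.2 pvCtxLen true with
    | s :: _ => out ++ [s]
    | [] => out) []

-- ===== PORT B =====
-- one step of B's loop: keep the stored skill unless this one's context is strictly longer
def pvStepB (best : PySem.Dict String (List (String × String))) (skill : List (String × String)) :
    PySem.Dict String (List (String × String)) :=
  match pvNameOf skill with
  | some n =>
    match best.get? n with
    | none => best.insert n skill
    | some cur => if pvCtxLen cur < pvCtxLen skill then best.insert n skill else best
  | none => best

def deduplicate_skills_py_alt (skills : List (List (String × String))) : List (List (String × String)) :=
  (skills.foldl pvStepB (PySem.Dict.mk [])).values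

-- ===== PRECONDITION & SPEC =====
-- Pre_ excludes exactly the skill dicts missing the "name" or "context" key, on which A raises KeyError.
def Pre_deduplicate_skills_py (skills : List (List (String × String))) : Prop :=
  ∀ skill ∈ skills, ((PySem.Dict.mk skill).get? "name").isSome = true ∧
    ((PySem.Dict.mk skill).get? "context").isSome = true
instance (skills : List (List (String × String))) : Decidable (Pre_deduplicate_skills_py skills) := by
  unfold Pre_deduplicate_skills_py; infer_instance

def pvWitness_deduplicate_skills_py : (List (List (String × String))) :=
  [[("name", "python"), ("context", "used python daily")], [("name", "python"), ("context", "python")]]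

def Spec_deduplicate_skills_py (skills : List (List (String × String))) (out : List (List (String × String))) : Prop := out = deduplicate_skills_py_alt skills
instance (skills : List (List (String × String))) (out : List (List (String × String))) : Decidable (Spec_deduplicate_skills_py skills out) := by unfold Spec_deduplicate_skills_py; infer_instance

-- ===== CLAIM (what is proved, stated in full; the proofs are below) =====
def Claim_equal_deduplicate_skills_py : Prop := ∀ (skills : List (List (String × String))), Dom_deduplicate_skills_py skills → Pre_deduplicate_skills_py skills → Spec_deduplicate_skills_py skills (deduplicate_skills_py skills)

-- ===== LEMMAS AND PROOFS =====

-- running strict-argmax over a group, seeded with its first element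
def pvBestOf (a : List (String × String)) (t : List (List (String × String))) : List (String × String) :=
  t.foldl (fun b x => if pvCtxLen b < pvCtxLen x then x else b) a

-- the element A's sort-then-head picks out of a (nonempty) group
def pvPick (g : List (List (String × String))) : List (String × String) :=
  match g with
  | [] => []
  | a :: t => pvBestOf a t

theorem pvBestOf_append (a : List (String × String)) (t : List (List (String × String)))
    (s : List (String × String)) :
    pvBestOf a (t ++ [s]) = if pvCtxLen (pvBestOf a t) < pvCtxLen s then s else pvBestOf a t := by
  simp [pvBestOf, List.foldl_append]

-- head of the descending insertion-sort fold is the running strict argmax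
theorem pvHead_foldl_insertBy (l : List (List (String × String)))
    (a : List (String × String)) (acc : List (List (String × String))) :
    ∃ r, l.foldl (fun acc x =>
        PySem.List.insertBy (fun a b => decide (pvCtxLen b < pvCtxLen a)) x acc) (a :: acc)
      = pvBestOf a l :: r := by
  induction l generalizing a acc with
  | nil => exact ⟨acc, rfl⟩
  | cons x l ih =>
    simp only [List.foldl_cons, PySem.List.insertBy]
    by_cases h : pvCtxLen a < pvCtxLen x
    · simp only [h, decide_true, if_true]
      obtain ⟨r, hr⟩ := ih x (a :: acc)
      exact ⟨r, by rw [hr]; simp [pvBestOf, h]⟩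
    · simp only [h, decide_false, Bool.false_eq_true, if_false]
      obtain ⟨r, hr⟩ := ih a (PySem.List.insertBy (fun a b => decide (pvCtxLen b < pvCtxLen a)) x acc)
      exact ⟨r, by rw [hr]; simp [pvBestOf, h]⟩

theorem pvSorted_head (a : List (String × String)) (t : List (List (String × String))) :
    ∃ r, PySem.List.sorted (a :: t) pvCtxLen true = pvBestOf a t :: r := by
  simpa [PySem.List.sorted, PySem.List.insertBy] using pvHead_foldl_insertBy t a []

-- in an assoc list with nodup keys, any member whose key matches the first find? IS that find?
theorem pvFind_unique {ν : Type} (l : List (String × ν)) (n : String)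
    (hnd : (l.map Prod.fst).Nodup) (e : String × ν)
    (hf : l.find? (fun q => q.1 == n) = some e) (p : String × ν) (hp : p ∈ l) (hpk : p.1 = n) :
    p = e := by
  induction l with
  | nil => cases hp
  | cons q l ih =>
    simp only [List.map_cons, List.nodup_cons] at hnd
    rw [List.mem_cons] at hp
    by_cases hq : (q.1 == n) = true
    · have hqe : q = e := by
        have hfq : List.find? (fun q => q.1 == n) (q :: l) = some q := by
          simp [hq]
        rw [hfq] at hf
        exact Option.some.inj hf
      rcases hp with rfl | hp
      · exact hqe
      · exact absurd ((hpk.trans (eq_of_beq hq).symm) ▸ List.mem_map_of_mem hp) hnd.1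
    · have hskip : List.find? (fun q => q.1 == n) (q :: l) = List.find? (fun q => q.1 == n) l := by
        simp [hq]
      rw [hskip] at hf
      rcases hp with rfl | hp
      · exact absurd (by simp [hpk]) hq
      · exact ih hnd.2 hf hp

-- get? through the pick-map
theorem pvGet_map (d : PySem.Dict String (List (List (String × String)))) (n : String) :
    (PySem.Dict.mk (d.items.map (fun p => (p.1, pvPick p.2)))).get? n = (d.get? n).map pvPick := by
  simp only [PySem.Dict.get?, List.find?_map]
  have : ((fun p : String × List (String × String) => p.1 == n) ∘
      (fun p : String × List (List (String × String)) => (p.1, pvPick p.2)))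
      = fun p => p.1 == n := rfl
  rw [this]
  cases List.find? (fun p => p.1 == n) d.items <;> rfl

-- the loop invariant, preserved by one step
theorem pvStep_inv (d : PySem.Dict String (List (List (String × String))))
    (b : PySem.Dict String (List (String × String))) (skill : List (String × String))
    (hb : b.items = d.items.map (fun p => (p.1, pvPick p.2)))
    (hne : ∀ p ∈ d.items, p.2 ≠ [])
    (hnd : (d.items.map Prod.fst).Nodup) :
    (pvStepB b skill).items = (pvStepA d skill).items.map (fun p => (p.1, pvPick p.2)) ∧
    (∀ p ∈ (pvStepA d skill).items, p.2 ≠ []) ∧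
    ((pvStepA d skill).items.map Prod.fst).Nodup := by
  cases hn : pvNameOf skill with
  | none =>
    refine ⟨?_, ?_, ?_⟩
    · simp only [pvStepA, pvStepB, hn]; exact hb
    · simp only [pvStepA, hn]; exact hne
    · simp only [pvStepA, hn]; exact hnd
  | some n =>
    simp only [pvStepA, pvStepB, hn]
    have hbget : b.get? n = (d.get? n).map pvPick := by
      rw [show b = PySem.Dict.mk (d.items.map (fun p => (p.1, pvPick p.2))) from
        PySem.Dict.ext hb]
      exact pvGet_map d n
    have hcont : b.contains n = d.contains n := by
      simp only [PySem.Dict.contains, hb, List.any_map]; rfl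
    cases hg : d.get? n with
    | none =>
      -- new key: both dicts append
      have hdc : d.contains n = false := by
        simp only [PySem.Dict.get?, Option.map_eq_none_iff, List.find?_eq_none] at hg
        simp only [PySem.Dict.contains, List.any_eq_false]
        intro p hp; exact hg p hp
      have hbc : b.contains n = false := by rw [hcont, hdc]
      rw [hbget, hg]
      constructor
      · simp only [PySem.Dict.modify, PySem.Dict.getD, hg, Option.getD_none,
          PySem.Dict.insert, hdc, hbc, Bool.false_eq_true, if_false]
        simp [hb, pvPick, pvBestOf]
      constructor
      · simp only [PySem.Dict.modify, PySem.Dict.getD, hg, Option.getD_none,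
          PySem.Dict.insert, hdc, Bool.false_eq_true, if_false]
        intro p hp
        rcases List.mem_append.mp hp with hp | hp
        · exact hne p hp
        · simp only [List.mem_singleton] at hp; simp [hp]
      · simp only [PySem.Dict.modify, PySem.Dict.getD, hg, Option.getD_none,
          PySem.Dict.insert, hdc, Bool.false_eq_true, if_false, List.map_append,
          List.nodup_append]
        refine ⟨hnd, by simp, ?_⟩
        simp only [PySem.Dict.get?, Option.map_eq_none_iff, List.find?_eq_none] at hg
        intro k hk m hm hkm
        have hm' : m = n := by simpa using hm
        obtain ⟨p, hp, hpk⟩ := List.mem_map.mp hk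
        exact (by simpa using hg p hp : ¬ p.1 = n) (by rw [hpk, hkm, hm'])
    | some g =>
      -- existing key: both dicts replace in place
      obtain ⟨e, hfe, hesnd⟩ : ∃ e, d.items.find? (fun q => q.1 == n) = some e ∧ e.2 = g := by
        simp only [PySem.Dict.get?] at hg
        cases hf : d.items.find? (fun q => q.1 == n) with
        | none => rw [hf] at hg; cases hg
        | some e => rw [hf] at hg; exact ⟨e, rfl, by simpa using hg⟩
      have hdc : d.contains n = true := by
        simp only [PySem.Dict.contains, List.any_eq_true]
        have hpe := List.find?_some hfe
        exact ⟨e, List.mem_of_find?_eq_some hfe, hpe⟩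
      have hbc : b.contains n = true := by rw [hcont, hdc]
      have hgne : g ≠ [] := hesnd ▸ hne e (List.mem_of_find?_eq_some hfe)
      obtain ⟨a, t, rfl⟩ : ∃ a t, g = a :: t := by
        cases g with
        | nil => exact absurd rfl hgne
        | cons a t => exact ⟨a, t, rfl⟩
      rw [hbget, hg]
      simp only [Option.map_some, pvPick]
      have hmem_key : ∀ p ∈ d.items, p.1 = n → p.2 = a :: t := by
        intro p hp hpk
        have := pvFind_unique d.items n hnd e hfe p hp hpk
        rw [this, hesnd]
      -- A's new dict
      have hdA : (d.modify n [] (fun g => g ++ [skill])).items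
          = d.items.map (fun p => if p.1 == n then (n, (a :: t) ++ [skill]) else p) := by
        simp only [PySem.Dict.modify, PySem.Dict.getD, hg, Option.getD_some,
          PySem.Dict.insert, hdc, if_true]
      by_cases hlt : pvCtxLen (pvBestOf a t) < pvCtxLen skill
      · rw [if_pos hlt]
        refine ⟨?_, ?_, ?_⟩
        · simp only [PySem.Dict.insert, hbc, if_true, hdA, hb, List.map_map]
          apply List.map_congr_left
          intro p hp
          by_cases hpk : (p.1 == n) = true
          · simp only [Function.comp, hpk, if_pos]
            simp [pvBestOf_append, hlt]
          · simp [Function.comp, hpk, pvPick]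
        · rw [hdA]; intro p hp
          obtain ⟨q, hq, hqe⟩ := List.mem_map.mp hp
          by_cases hqk : (q.1 == n) = true
          · rw [if_pos hqk] at hqe; rw [← hqe]; simp
          · rw [if_neg hqk] at hqe; exact hqe ▸ hne q hq
        · rw [hdA, List.map_map]
          have : (Prod.fst ∘ fun p : String × List (List (String × String)) =>
              if p.1 == n then (n, (a :: t) ++ [skill]) else p) = Prod.fst := by
            funext p; by_cases hpk : (p.1 == n) = true
            · simp [Function.comp, eq_of_beq hpk]
            · simp [Function.comp, hpk]
          rw [this]; exact hnd
      · rw [if_neg hlt]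
        refine ⟨?_, ?_, ?_⟩
        · rw [hdA, hb, List.map_map]
          apply List.map_congr_left
          intro p hp
          by_cases hpk : (p.1 == n) = true
          · simp only [Function.comp, hpk, if_true]
            have hp2 : p.2 = a :: t := hmem_key p hp (eq_of_beq hpk)
            simp [pvPick, pvBestOf_append, hlt, eq_of_beq hpk, hp2]
          · simp [Function.comp, hpk, pvPick]
        · rw [hdA]; intro p hp
          obtain ⟨q, hq, hqe⟩ := List.mem_map.mp hp
          by_cases hqk : (q.1 == n) = true
          · rw [if_pos hqk] at hqe; rw [← hqe]; simp
          · rw [if_neg hqk] at hqe; exact hqe ▸ hne q hq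
        · rw [hdA, List.map_map]
          have : (Prod.fst ∘ fun p : String × List (List (String × String)) =>
              if p.1 == n then (n, (a :: t) ++ [skill]) else p) = Prod.fst := by
            funext p; by_cases hpk : (p.1 == n) = true
            · simp [Function.comp, eq_of_beq hpk]
            · simp [Function.comp, hpk]
          rw [this]; exact hnd

theorem pvFold_inv (skills : List (List (String × String)))
    (d : PySem.Dict String (List (List (String × String))))
    (b : PySem.Dict String (List (String × String)))
    (hb : b.items = d.items.map (fun p => (p.1, pvPick p.2)))
    (hne : ∀ p ∈ d.items, p.2 ≠ [])
    (hnd : (d.items.map Prod.fst).Nodup) :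
    (skills.foldl pvStepB b).items
      = (skills.foldl pvStepA d).items.map (fun p => (p.1, pvPick p.2)) ∧
    (∀ p ∈ (skills.foldl pvStepA d).items, p.2 ≠ []) := by
  induction skills generalizing d b with
  | nil => exact ⟨hb, hne⟩
  | cons s l ih =>
    obtain ⟨h1, h2, h3⟩ := pvStep_inv d b s hb hne hnd
    exact ih (pvStepA d s) (pvStepB b s) h1 h2 h3

-- ===== VERDICT (by name: the statement is the Claim_ definition above) =====
theorem deduplicate_skills_py_spec : Claim_equal_deduplicate_skills_py := by
  intro skills _ _
  unfold Spec_deduplicate_skills_py deduplicate_skills_py deduplicate_skills_py_alt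
  obtain ⟨hitems, hne⟩ := pvFold_inv skills (PySem.Dict.mk []) (PySem.Dict.mk [])
    (by rfl) (by intro p hp; cases hp) (by simp)
  simp only [PySem.Dict.values, hitems, List.map_map]
  have hcongr : (List.foldl pvStepA (PySem.Dict.mk []) skills).items.foldl
      (fun out p =>
        match PySem.List.sorted p.2 pvCtxLen true with
        | s :: _ => out ++ [s]
        | [] => out) ([] : List (List (String × String)))
      = (List.foldl pvStepA (PySem.Dict.mk []) skills).items.foldl
      (fun out p => out ++ [pvPick p.2]) [] := by
    apply PySem.List.foldl_congr_mem
    intro acc p hp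
    obtain ⟨a, t, hpt⟩ : ∃ a t, p.2 = a :: t := by
      cases hpg : p.2 with
      | nil => exact absurd hpg (hne p hp)
      | cons a t => exact ⟨a, t, rfl⟩
    obtain ⟨r, hr⟩ := pvSorted_head a t
    rw [hpt, hr]
    rfl
  rw [hcongr, PySem.List.foldl_append_singleton_eq_map]
  simp [Function.comp]
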